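-- pv_equiv track=rewrite | github.com/seehwan/cpython | jit_poc/18.stencil_guided_gadget_scan.py | gadget_cmp
-- ===== SOURCE A (Python) =====
-- def gadget_cmp(x, y):
--     acc = 0
--     for i in range(60):
--         if x > (i ^ y):
--             acc += x
--         else:
--             acc -= y
--     return acc
-- ===== SOURCE B (Python) =====
-- def gadget_cmp(x, y):
--     # O(1) closed form, no loop. For 0 <= i < 64, i ^ y = (y - y % 64) + (i ^ (y % 64)),
--     # and i -> i ^ k is a bijection of {0..63}; the four indices 60..63 that the loop
--     # skips map onto the aligned block {4b, 4b+1, 4b+2, 4b+3} with b = (k >> 2) ^ 15.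
--     # So the number of winning iterations is (values of 0..63 below t) minus (values of
--     # that block below t), each a clamp.
--     k = y % 64
--     t = x - (y - k)                     # x > (i ^ y)  <=>  (i ^ k) < t
--     b = (k // 4) ^ 15
--     full = min(max(t, 0), 64)           # how many of 0..63 are < t
--     block = min(max(t - 4 * b, 0), 4)   # how many of {4b..4b+3} are < t
--     count = full - block
--     return count * x - (60 - count) * y
-- ===== Notes on version B (the rewrite author's own statement) =====
-- stated objective: faster
-- what changed: B replaces A's 60-iteration xor-compare loop by an O(1) closed form: since i^y = (y - y%64) + (i^(y%64)) and i -> i^k permutes 0..63, the number of winning iterations is clamp(t,0,64) - clamp(t-4b,0,4) with t = x-(y-y%64) and b = ((y%64)>>2)^15, combined once as count*x - (60-count)*y.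
import Mathlib
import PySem

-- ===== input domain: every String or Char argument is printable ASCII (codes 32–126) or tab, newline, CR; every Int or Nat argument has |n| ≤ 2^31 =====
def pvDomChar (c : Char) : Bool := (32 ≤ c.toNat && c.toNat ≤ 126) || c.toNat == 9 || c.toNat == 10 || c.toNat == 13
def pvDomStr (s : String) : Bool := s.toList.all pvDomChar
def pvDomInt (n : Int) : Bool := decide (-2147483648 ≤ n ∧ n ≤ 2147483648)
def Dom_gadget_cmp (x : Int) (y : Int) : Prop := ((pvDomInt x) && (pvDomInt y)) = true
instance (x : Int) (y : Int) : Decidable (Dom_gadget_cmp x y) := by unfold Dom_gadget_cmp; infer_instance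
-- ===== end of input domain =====

-- B replaces A's 60-iteration xor-compare loop by an O(1) clamp-based closed form (objective: faster).

-- ===== PORT A =====
def gadget_cmp (x : Int) (y : Int) : Int :=
  (PySem.List.pyRange 0 60 1).foldl
    (fun acc i => if x > PySem.Int.bxor i y then acc + x else acc - y) 0

-- ===== PORT B =====
def gadget_cmp_alt (x : Int) (y : Int) : Int :=
  let k := PySem.Int.mod y 64
  let t := x - (y - k)
  let b := PySem.Int.bxor (PySem.Int.floordiv k 4) 15
  let full := min (max t 0) 64
  let block := min (max (t - 4 * b) 0) 4
  let count := full - block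
  count * x - (60 - count) * y

-- ===== PRECONDITION & SPEC =====
def Spec_gadget_cmp (x : Int) (y : Int) (out : Int) : Prop := out = gadget_cmp_alt x y
instance (x : Int) (y : Int) (out : Int) : Decidable (Spec_gadget_cmp x y out) := by unfold Spec_gadget_cmp; infer_instance

-- ===== CLAIM (what is proved, stated in full; the proofs are below) =====
def Claim_equal_gadget_cmp : Prop := ∀ (x : Int) (y : Int), Dom_gadget_cmp x y → Spec_gadget_cmp x y (gadget_cmp x y)

-- ===== LEMMAS AND PROOFS =====

-- For i, k < 64 the xor only touches the low six bits: i ^^^ (64*m + k) = 64*m + (i ^^^ k).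
theorem natXorSplit (m i k : Nat) (hi : i < 64) (hk : k < 64) :
    i ^^^ (64 * m + k) = 64 * m + (i ^^^ k) := by
  have h64 : (64:Nat) = 2 ^ 6 := rfl
  have h1 : (i ^^^ (64 * m + k)) % 64 = i ^^^ k := by
    rw [h64, Nat.xor_mod_two_pow]
    congr 1 <;> omega
  have h2 : (i ^^^ (64 * m + k)) / 64 = m := by
    have h := Nat.shiftRight_xor_distrib (a := i) (b := 64 * m + k) (i := 6)
    simp only [Nat.shiftRight_eq_div_pow] at h
    have hi0 : i / 2 ^ 6 = 0 := by omega
    rw [h64] at h ⊢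
    rw [h, hi0, Nat.zero_xor]
    omega
  omega

theorem natXorComplAux : ∀ i < 64, ∀ k < 64, i ^^^ (63 - k) = 63 - (i ^^^ k) := by decide

theorem natXorLt (i k : Nat) (hi : i < 64) (hk : k < 64) : i ^^^ k < 64 :=
  Nat.xor_lt_two_pow (n := 6) hi hk

-- Python-int version of the split, both signs of m (two's-complement branch via 63 - k).
theorem bxorSplit (m i k : Int) (hi0 : 0 ≤ i) (hi : i < 64) (hk0 : 0 ≤ k) (hk : k < 64) :
    PySem.Int.bxor i (64 * m + k) = 64 * m + PySem.Int.bxor i k := by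
  obtain ⟨iN, rfl⟩ := Int.eq_ofNat_of_zero_le hi0
  obtain ⟨kN, rfl⟩ := Int.eq_ofNat_of_zero_le hk0
  have hiN : iN < 64 := by exact_mod_cast hi
  have hkN : kN < 64 := by exact_mod_cast hk
  rcases le_or_gt 0 m with hm | hm
  · obtain ⟨mN, rfl⟩ := Int.eq_ofNat_of_zero_le hm
    have hrw : (64 * (mN:Int) + kN) = ((64 * mN + kN : Nat) : Int) := by push_cast; ring
    rw [hrw, PySem.Int.bxor_natCast, PySem.Int.bxor_natCast, natXorSplit mN iN kN hiN hkN]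
    push_cast; ring
  · have hneg : ¬ (0 ≤ 64 * m + (kN:Int)) := by omega
    have hpos : (0:Int) ≤ (iN:Int) := by positivity
    rw [PySem.Int.bxor, if_pos hpos, if_neg hneg]
    have htn : (-(64 * m + (kN:Int)) - 1).toNat = 64 * (-m-1).toNat + (63 - kN) := by omega
    rw [htn]
    have h1 := natXorSplit (-m-1).toNat iN (63 - kN) hiN (by omega)
    have h2 := natXorComplAux iN hiN kN hkN
    have h3 := natXorLt iN kN hiN hkN
    rw [Int.toNat_natCast, h1, h2, PySem.Int.bxor_natCast]
    omega

-- A's loop in terms of the number of winning iterations.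
theorem foldCount (x y : Int) (l : List Int) (acc : Int) :
    l.foldl (fun a i => if x > PySem.Int.bxor i y then a + x else a - y) acc
      = acc + (l.countP (fun i => decide (x > PySem.Int.bxor i y)) : Int) * x
          - ((l.length : Int) - (l.countP (fun i => decide (x > PySem.Int.bxor i y)) : Int)) * y := by
  induction l generalizing acc with
  | nil => simp
  | cons h t ih =>
    simp only [List.foldl_cons, List.countP_cons, List.length_cons, ih]
    by_cases hc : x > PySem.Int.bxor h y
    · simp only [if_pos hc, decide_eq_true hc, if_true]; push_cast; ring
    · simp only [if_neg hc, decide_eq_false hc, Bool.false_eq_true, if_false]; push_cast; ring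

-- How many of 0..n-1 lie below t: a clamp.
theorem rangeCount (n : Nat) (t : Int) :
    (((PySem.List.pyRange 0 n 1).countP (fun v => decide (t > v)) : Nat) : Int)
      = min (max t 0) n := by
  induction n with
  | zero => simp
  | succ n ih =>
    have hsplit : PySem.List.pyRange 0 (((n:Int)+1)) 1
        = PySem.List.pyRange 0 n 1 ++ [(n:Int)] :=
      PySem.List.pyRange_one_succ_right (by positivity)
    have hc : ((n+1 : Nat) : Int) = (n:Int) + 1 := by push_cast; ring
    rw [hc, hsplit, List.countP_append]
    simp only [List.countP_cons, List.countP_nil]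
    by_cases hb : t > (n:Int)
    · simp only [decide_eq_true hb]; push_cast; omega
    · simp only [decide_eq_false hb, Bool.false_eq_true, if_false]; push_cast; omega

-- How many of an aligned block a, a+1, a+2, a+3 lie below t: a clamp.
theorem blockCount (a t : Int) :
    ((([a, a+1, a+2, a+3].countP (fun v => decide (t > v)) : Nat)) : Int)
      = min (max (t - a) 0) 4 := by
  simp only [List.countP_cons, List.countP_nil]
  by_cases h0 : t > a <;> by_cases h1 : t > a+1 <;> by_cases h2 : t > a+2 <;> by_cases h3 : t > a+3 <;>
    simp [h0, h1, h2, h3] <;> omega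

-- i ↦ i ^^^ k permutes 0..63.
theorem bxorMapPerm (k : Int) (h0 : 0 ≤ k) (h1 : k < 64) :
    ((PySem.List.pyRange 0 64 1).map (fun i => PySem.Int.bxor i k)).Perm
      (PySem.List.pyRange 0 64 1) := by
  obtain ⟨kN, rfl⟩ := Int.eq_ofNat_of_zero_le h0
  have hkN : kN < 64 := by exact_mod_cast h1
  have hmem : ∀ x ∈ PySem.List.pyRange 0 64 1, 0 ≤ x ∧ x < 64 := by
    intro x hx
    have := (PySem.List.mem_pyRange_one).1 hx
    omega
  have hnd : (PySem.List.pyRange 0 64 1).Nodup := PySem.List.nodup_pyRange_one 0 64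
  have hndm : ((PySem.List.pyRange 0 64 1).map (fun i => PySem.Int.bxor i kN)).Nodup := by
    refine hnd.map_on ?_
    intro x hx y hy hxy
    obtain ⟨hx0, _⟩ := hmem x hx
    obtain ⟨hy0, _⟩ := hmem y hy
    obtain ⟨xN, rfl⟩ := Int.eq_ofNat_of_zero_le hx0
    obtain ⟨yN, rfl⟩ := Int.eq_ofNat_of_zero_le hy0
    rw [PySem.Int.bxor_natCast, PySem.Int.bxor_natCast] at hxy
    have hforget : xN ^^^ kN = yN ^^^ kN := by exact_mod_cast hxy
    have := congrArg (· ^^^ kN) hforget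
    simpa [Nat.xor_xor_cancel_right] using this
  have hsub : ((PySem.List.pyRange 0 64 1).map (fun i => PySem.Int.bxor i kN))
      ⊆ PySem.List.pyRange 0 64 1 := by
    intro v hv
    obtain ⟨i, hi, rfl⟩ := List.mem_map.1 hv
    obtain ⟨hi0, hi64⟩ := hmem i hi
    obtain ⟨iN, rfl⟩ := Int.eq_ofNat_of_zero_le hi0
    have hiN : iN < 64 := by exact_mod_cast hi64
    rw [PySem.Int.bxor_natCast]
    refine (PySem.List.mem_pyRange_one).2 ⟨by positivity, ?_⟩
    exact_mod_cast natXorLt iN kN hiN hkN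
  refine (List.subperm_of_subset hndm hsub).perm_of_length_le ?_
  simp

-- The four skipped indices 60..63 map onto the aligned block 4b..4b+3, b = (k >> 2) ^ 15.
theorem blockPerm (k : Int) (h0 : 0 ≤ k) (h1 : k < 64) :
    ([PySem.Int.bxor 60 k, PySem.Int.bxor 61 k, PySem.Int.bxor 62 k, PySem.Int.bxor 63 k]).Perm
      [4 * PySem.Int.bxor (PySem.Int.floordiv k 4) 15,
       4 * PySem.Int.bxor (PySem.Int.floordiv k 4) 15 + 1,
       4 * PySem.Int.bxor (PySem.Int.floordiv k 4) 15 + 2,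
       4 * PySem.Int.bxor (PySem.Int.floordiv k 4) 15 + 3] := by
  interval_cases k <;> decide

-- ===== VERDICT (by name: the statement is the Claim_ definition above) =====
theorem gadget_cmp_spec : Claim_equal_gadget_cmp := by
  intro x y _
  show gadget_cmp x y = gadget_cmp_alt x y
  set k := PySem.Int.mod y 64 with hkdef
  set d := PySem.Int.floordiv y 64 with hddef
  set b := PySem.Int.bxor (PySem.Int.floordiv k 4) 15 with hbdef
  set t := x - (y - k) with htdef
  have hk0 : 0 ≤ k := PySem.Int.mod_nonneg y (by norm_num)
  have hk64 : k < 64 := PySem.Int.mod_lt y (by norm_num)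
  have hy : d * 64 + k = y := PySem.Int.floordiv_mul_add_mod y 64
  have haltEq : gadget_cmp_alt x y
      = (min (max t 0) 64 - min (max (t - 4 * b) 0) 4) * x
        - (60 - (min (max t 0) 64 - min (max (t - 4 * b) 0) 4)) * y := rfl
  -- A side: loop → count of winning iterations
  have hA : gadget_cmp x y
      = ((PySem.List.pyRange 0 60 1).countP (fun i => decide (x > PySem.Int.bxor i y)) : Int) * x
        - (60 - ((PySem.List.pyRange 0 60 1).countP (fun i => decide (x > PySem.Int.bxor i y)) : Int)) * y := by
    unfold gadget_cmp
    rw [foldCount]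
    have hlen : ((PySem.List.pyRange 0 60 1).length : Int) = 60 := by decide
    rw [hlen]
    ring
  -- rewrite the per-iteration condition via the low-six-bit split
  have hcong : (PySem.List.pyRange 0 60 1).countP (fun i => decide (x > PySem.Int.bxor i y))
      = (PySem.List.pyRange 0 60 1).countP ((fun v => decide (t > v)) ∘ (fun i => PySem.Int.bxor i k)) := by
    apply List.countP_congr
    intro i hi
    obtain ⟨hi0, hi60⟩ := (PySem.List.mem_pyRange_one).1 hi
    have hsplit : PySem.Int.bxor i y = 64 * d + PySem.Int.bxor i k := by
      calc PySem.Int.bxor i y = PySem.Int.bxor i (64 * d + k) := by rw [show 64 * d + k = y by omega]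
        _ = 64 * d + PySem.Int.bxor i k := bxorSplit d i k hi0 (by omega) hk0 hk64
    simp only [Function.comp]
    rw [hsplit]
    have htd : t = x - 64 * d := by omega
    rw [htd]
    simp only [decide_eq_true_eq]
    constructor <;> intro <;> omega
  -- count over the mapped values, related to the full 0..63 count minus the block count
  have hperm := (bxorMapPerm k hk0 hk64).countP_eq (fun v => decide (t > v))
  have hsplit64 : PySem.List.pyRange 0 64 1
      = PySem.List.pyRange 0 60 1 ++ [(60:Int), 61, 62, 63] := by decide
  rw [hsplit64, List.map_append, List.countP_append] at hperm
  have hbigval : (((PySem.List.pyRange 0 60 1 ++ [(60:Int), 61, 62, 63]).countP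
        (fun v => decide (t > v)) : Nat) : Int) = min (max t 0) 64 := by
    rw [← hsplit64]
    have := rangeCount 64 t
    norm_num at this
    exact this
  have hblockval : ((([(60:Int), 61, 62, 63].map (fun i => PySem.Int.bxor i k)).countP
        (fun v => decide (t > v)) : Nat) : Int) = min (max (t - 4 * b) 0) 4 := by
    have hmapped : ([(60:Int), 61, 62, 63].map (fun i => PySem.Int.bxor i k))
        = [PySem.Int.bxor 60 k, PySem.Int.bxor 61 k, PySem.Int.bxor 62 k, PySem.Int.bxor 63 k] := by
      simp
    rw [hmapped, (blockPerm k hk0 hk64).countP_eq (fun v => decide (t > v)), ← hbdef]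
    have := blockCount (4 * b) t
    simpa using this
  -- assemble
  rw [hA, hcong, ← List.countP_map, haltEq]
  have hcount : (((PySem.List.pyRange 0 60 1).map (fun i => PySem.Int.bxor i k)).countP
        (fun v => decide (t > v)) : Int)
      = min (max t 0) 64 - min (max (t - 4 * b) 0) 4 := by
    omega
  rw [hcount]
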